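-- pv_equiv track=rewrite | github.com/deepomicslab/INVAS | scripts/rna_test/sim_multi_trans_inv/link_inv_frag3.py | find_nearest_exon
-- ===== SOURCE A (Python) =====
-- def find_nearest_exon(exons, chrom, position):
--     nearest_exon = None
--     min_dist = float('inf')
--     for exon in exons.get(chrom, []):
--         exon_start, exon_end = exon
--         if exon_end < position:
--             dist = position - exon_end
--         elif exon_start > position:
--             dist = exon_start - position
--         else:
--             return exon
--         if dist < min_dist:
--             min_dist = dist
--             nearest_exon = exon
--     return nearest_exon
-- ===== SOURCE B (Python) =====
-- def find_nearest_exon(exons, chrom, position):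
--     exon_list = exons.get(chrom, [])
--     # pass 1: a containing exon wins immediately
--     for start, end in exon_list:
--         if start <= position <= end:
--             return (start, end)
--     # pass 2: first exon achieving the strictly minimal gap
--     best = None
--     for start, end in exon_list:
--         dist = position - end if end < position else start - position
--         if best is None or dist < best[0]:
--             best = (dist, (start, end))
--     return best[1] if best is not None else None
-- ===== Notes on version B (the rewrite author's own statement) =====
-- stated objective: simpler
-- what changed: Single stateful scan with an infinity sentinel replaced by two plain passes: first a containment check (first spanning exon returns), then a first-strict-minimum gap selection over the same list.
import Mathlib
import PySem

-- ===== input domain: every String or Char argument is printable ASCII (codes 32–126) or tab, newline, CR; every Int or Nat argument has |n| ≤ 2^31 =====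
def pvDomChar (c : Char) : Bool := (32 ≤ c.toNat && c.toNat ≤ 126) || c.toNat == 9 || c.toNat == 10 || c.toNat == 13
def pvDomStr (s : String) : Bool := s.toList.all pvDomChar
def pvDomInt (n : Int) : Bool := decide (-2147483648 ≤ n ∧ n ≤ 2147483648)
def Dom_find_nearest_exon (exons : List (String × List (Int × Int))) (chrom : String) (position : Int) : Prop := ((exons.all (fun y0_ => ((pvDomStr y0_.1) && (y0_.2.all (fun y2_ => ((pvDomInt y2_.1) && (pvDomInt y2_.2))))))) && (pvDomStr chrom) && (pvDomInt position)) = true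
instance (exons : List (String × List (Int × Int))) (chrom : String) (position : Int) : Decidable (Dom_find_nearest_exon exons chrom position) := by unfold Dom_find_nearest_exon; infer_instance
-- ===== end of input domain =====

-- B replaces A's single stateful min-tracking scan (with an infinity sentinel) by two plain
-- passes: containment first, then a first-strict-minimum gap selection; objective: simpler.

-- ===== PORT A =====
-- A's loop: state (nearest_exon, min_dist); min_dist = none encodes float('inf').
def pvGoA (position : Int) : List (Int × Int) → Option (Int × Int) → Option Int → Option (Int × Int)
  | [], nearest, _ => nearest
  | (s, e) :: rest, nearest, md =>
    if e < position then
      let d := position - e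
      if (match md with | none => true | some m => decide (d < m)) then
        pvGoA position rest (some (s, e)) (some d)
      else
        pvGoA position rest nearest md
    else if s > position then
      let d := s - position
      if (match md with | none => true | some m => decide (d < m)) then
        pvGoA position rest (some (s, e)) (some d)
      else
        pvGoA position rest nearest md
    else
      some (s, e)

def find_nearest_exon (exons : List (String × List (Int × Int))) (chrom : String) (position : Int) : Option (Int × Int) :=
  pvGoA position (PySem.Dict.getD (PySem.Dict.mk exons) chrom []) none none

-- ===== PORT B =====
-- B's second pass: best = none | some (dist, exon); first strict minimum kept.
def pvGoB (position : Int) : List (Int × Int) → Option (Int × (Int × Int)) → Option (Int × (Int × Int))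
  | [], best => best
  | (s, e) :: rest, best =>
    let d := if e < position then position - e else s - position
    match best with
    | none => pvGoB position rest (some (d, (s, e)))
    | some (bd, bx) =>
      if d < bd then pvGoB position rest (some (d, (s, e)))
      else pvGoB position rest (some (bd, bx))

def find_nearest_exon_alt (exons : List (String × List (Int × Int))) (chrom : String) (position : Int) : Option (Int × Int) :=
  let exonList := PySem.Dict.getD (PySem.Dict.mk exons) chrom []
  match exonList.find? (fun p => decide (p.1 ≤ position ∧ position ≤ p.2)) with
  | some x => some x
  | none => (pvGoB position exonList none).map (·.2)

-- ===== PRECONDITION & SPEC =====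
def Spec_find_nearest_exon (exons : List (String × List (Int × Int))) (chrom : String) (position : Int) (out : Option (Int × Int)) : Prop := out = find_nearest_exon_alt exons chrom position
instance (exons : List (String × List (Int × Int))) (chrom : String) (position : Int) (out : Option (Int × Int)) : Decidable (Spec_find_nearest_exon exons chrom position out) := by unfold Spec_find_nearest_exon; infer_instance

-- ===== CLAIM (what is proved, stated in full; the proofs are below) =====
def Claim_equal_find_nearest_exon : Prop := ∀ (exons : List (String × List (Int × Int))) (chrom : String) (position : Int), Dom_find_nearest_exon exons chrom position → Spec_find_nearest_exon exons chrom position (find_nearest_exon exons chrom position)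

-- ===== LEMMAS AND PROOFS =====

-- A's scan with state acc equals: first containing exon if any, else B's two passes from acc.
theorem pvGoA_eq_two_pass (position : Int) (l : List (Int × Int))
    (acc : Option (Int × (Int × Int))) :
    pvGoA position l (acc.map (·.2)) (acc.map (·.1)) =
      (match l.find? (fun p => decide (p.1 ≤ position ∧ position ≤ p.2)) with
       | some x => some x
       | none => (pvGoB position l acc).map (·.2)) := by
  induction l generalizing acc with
  | nil => cases acc <;> simp [pvGoA, pvGoB]
  | cons hd tl ih =>
    obtain ⟨s, e⟩ := hd
    by_cases he : e < position
    · have hnc : ¬ (s ≤ position ∧ position ≤ e) := by omega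
      cases acc with
      | none =>
        simpa [pvGoA, pvGoB, List.find?, hnc, he] using ih (some (position - e, (s, e)))
      | some b =>
        obtain ⟨bd, bx⟩ := b
        by_cases hlt : position - e < bd
        · simpa [pvGoA, pvGoB, List.find?, hnc, he, hlt] using ih (some (position - e, (s, e)))
        · simpa [pvGoA, pvGoB, List.find?, hnc, he, hlt] using ih (some (bd, bx))
    · by_cases hs : s > position
      · have hnc : ¬ (s ≤ position ∧ position ≤ e) := by omega
        cases acc with
        | none =>
          simpa [pvGoA, pvGoB, List.find?, hnc, he, hs] using ih (some (s - position, (s, e)))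
        | some b =>
          obtain ⟨bd, bx⟩ := b
          by_cases hlt : s - position < bd
          · simpa [pvGoA, pvGoB, List.find?, hnc, he, hs, hlt] using ih (some (s - position, (s, e)))
          · simpa [pvGoA, pvGoB, List.find?, hnc, he, hs, hlt] using ih (some (bd, bx))
      · have hc : s ≤ position ∧ position ≤ e := by omega
        simp [pvGoA, List.find?, hc, he, hs]

-- ===== VERDICT (by name: the statement is the Claim_ definition above) =====
theorem find_nearest_exon_spec : Claim_equal_find_nearest_exon := by
  intro exons chrom position _
  unfold Spec_find_nearest_exon find_nearest_exon find_nearest_exon_alt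
  simpa using pvGoA_eq_two_pass position (PySem.Dict.getD (PySem.Dict.mk exons) chrom []) none
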